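-- pv_equiv track=rewrite | github.com/ahmadSoliman94/resume_parser | app/core/utils.py | categorize_skills
-- ===== SOURCE A (Python) =====
-- def categorize_skills(
--     skills: list[str], categories: dict[str, list[str]]
-- ) -> dict[str, list[str]]:
--     """
--     Categorize skills into different categories.
--
--     Args:
--         skills: List of skills to categorize
--         categories: Dictionary mapping category names to lists of skills in
--                     that category
--
--     Returns:
--         Dictionary mapping category names to found skills in that category
--     """
--     result: dict[str, list[str]] = {category: [] for category in categories}
--
--     for skill in skills:
--         skill_lower = skill.lower()
--
--         for category, category_skills in categories.items():
--             if skill_lower in [s.lower() for s in category_skills]: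
--                 result[category].append(skill)
--                 break
--
--     return {k: v for k, v in result.items() if v}  # Remove empty categories
-- ===== SOURCE B (Python) =====
-- def categorize_skills(
--     skills: list[str], categories: dict[str, list[str]]
-- ) -> dict[str, list[str]]:
--     """Inverted-index re-implementation: one pass builds a lowercase-skill ->
--     first-category map, one pass over skills does a dict lookup instead of a
--     nested scan over categories."""
--     lookup: dict[str, str] = {}
--     for category, category_skills in categories.items():
--         for s in category_skills:
--             s_lower = s.lower()
--             if s_lower not in lookup:
--                 lookup[s_lower] = category
--
--     result: dict[str, list[str]] = {category: [] for category in categories}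
--     for skill in skills:
--         category = lookup.get(skill.lower())
--         if category is not None:
--             result[category].append(skill)
--
--     return {k: v for k, v in result.items() if v}
-- ===== Notes on version B (the rewrite author's own statement) =====
-- stated objective: faster
-- what changed: Replaces the per-skill nested scan over all categories (with break) by a one-time inverted index mapping each lowercased catalogue skill to its first category, so each skill is categorized by a single dict lookup.
import Mathlib
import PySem

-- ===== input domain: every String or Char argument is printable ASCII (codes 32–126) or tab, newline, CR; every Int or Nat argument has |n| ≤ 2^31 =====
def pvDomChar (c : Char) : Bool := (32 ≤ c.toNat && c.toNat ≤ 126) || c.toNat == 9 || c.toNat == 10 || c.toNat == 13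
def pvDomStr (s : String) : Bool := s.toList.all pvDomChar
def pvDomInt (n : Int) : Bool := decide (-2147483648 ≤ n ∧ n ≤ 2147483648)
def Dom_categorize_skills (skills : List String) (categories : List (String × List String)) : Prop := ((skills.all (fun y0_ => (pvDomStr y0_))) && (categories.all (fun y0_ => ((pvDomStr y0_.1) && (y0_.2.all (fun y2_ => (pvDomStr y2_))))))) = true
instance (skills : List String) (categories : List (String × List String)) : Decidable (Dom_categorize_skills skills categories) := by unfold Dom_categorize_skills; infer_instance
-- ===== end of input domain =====

-- B replaces A's per-skill scan over all categories by a one-time inverted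
-- index (lowercased skill -> first category) and a single lookup pass.

-- ===== PORT A =====
-- the inner 'for category, category_skills in categories.items(): … break' loop of A
def pvAInner (skill_lower : String) (cats : List (String × List String))
    (result : PySem.Dict String (List String)) (skill : String) : PySem.Dict String (List String) :=
  match cats with
  | [] => result
  | (category, category_skills) :: rest =>
      if (category_skills.map PySem.Str.lower).contains skill_lower then
        result.modify category [] (· ++ [skill])
      else pvAInner skill_lower rest result skill

def categorize_skills (skills : List String) (categories : List (String × List String)) : List (String × List String) :=
  let result : PySem.Dict String (List String) :=
    categories.foldl (fun d p => d.insert p.1 []) PySem.Dict.empty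
  let result :=
    skills.foldl (fun d skill => pvAInner (PySem.Str.lower skill) categories d skill) result
  (result.items.filter (fun p => !p.2.isEmpty))

-- ===== PORT B =====
-- 'for s in category_skills: if s.lower() not in lookup: lookup[s.lower()] = category'
def pvBIndexCat (category : String) (category_skills : List String)
    (lookup : PySem.Dict String String) : PySem.Dict String String :=
  category_skills.foldl
    (fun d s =>
      let s_lower := PySem.Str.lower s
      if d.contains s_lower then d else d.insert s_lower category) lookup

def pvBIndex (categories : List (String × List String)) : PySem.Dict String String :=
  categories.foldl (fun d p => pvBIndexCat p.1 p.2 d) PySem.Dict.empty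

def categorize_skills_alt (skills : List String) (categories : List (String × List String)) : List (String × List String) :=
  let lookup := pvBIndex categories
  let result : PySem.Dict String (List String) :=
    categories.foldl (fun d p => d.insert p.1 []) PySem.Dict.empty
  let result :=
    skills.foldl
      (fun d skill =>
        match lookup.get? (PySem.Str.lower skill) with
        | some category => d.modify category [] (· ++ [skill])
        | none => d) result
  (result.items.filter (fun p => !p.2.isEmpty))

-- ===== PRECONDITION & SPEC =====
-- Pre_: the Python 'categories' argument is a dict, whose keys are necessarily
-- distinct; the association list must have pairwise-distinct category names.
-- It excludes no input the Python A accepts (a dict cannot carry duplicate keys).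
def Pre_categorize_skills (skills : List String) (categories : List (String × List String)) : Prop :=
  (categories.map Prod.fst).Nodup
instance (skills : List String) (categories : List (String × List String)) : Decidable (Pre_categorize_skills skills categories) := by unfold Pre_categorize_skills; infer_instance

def pvWitness_categorize_skills : List String × (List (String × List String)) :=
  (["Python", "sql", "Excel"], [("prog", ["python", "java"]), ("data", ["SQL", "python"])])

def Spec_categorize_skills (skills : List String) (categories : List (String × List String)) (out : List (String × List String)) : Prop := out = categorize_skills_alt skills categories
instance (skills : List String) (categories : List (String × List String)) (out : List (String × List String)) : Decidable (Spec_categorize_skills skills categories out) := by unfold Spec_categorize_skills; infer_instance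

-- ===== CLAIM (what is proved, stated in full; the proofs are below) =====
def Claim_equal_categorize_skills : Prop := ∀ (skills : List String) (categories : List (String × List String)), Dom_categorize_skills skills categories → Pre_categorize_skills skills categories → Spec_categorize_skills skills categories (categorize_skills skills categories)

-- ===== LEMMAS AND PROOFS =====

-- the first-match semantics of one category's index pass
theorem pvBIndexCat_get? (category : String) (ss : List String)
    (d : PySem.Dict String String) (sl : String) :
    (pvBIndexCat category ss d).get? sl =
      match d.get? sl with
      | some v => some v
      | none => if (ss.map PySem.Str.lower).contains sl then some category else none := by
  induction ss generalizing d with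
  | nil => cases h : d.get? sl <;> simp [pvBIndexCat, h]
  | cons s rest ih =>
    simp only [pvBIndexCat, List.foldl_cons]
    by_cases hc : d.contains (PySem.Str.lower s) = true
    · rw [if_pos hc]
      rw [show (rest.foldl _ d) = pvBIndexCat category rest d from rfl, ih]
      have hsome : (d.get? (PySem.Str.lower s)).isSome = true := by
        rw [← PySem.Dict.contains_eq_isSome_get?]; exact hc
      cases h : d.get? sl with
      | some v => simp
      | none =>
        have hne : PySem.Str.lower s ≠ sl := by
          intro he; rw [he, h] at hsome; simp at hsome
        have hne' : ¬ (sl = PySem.Str.lower s) := fun hx => hne hx.symm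
        simp [List.contains_cons, hne']
    · rw [if_neg hc]
      rw [show (rest.foldl _ _) = pvBIndexCat category rest (d.insert (PySem.Str.lower s) category) from rfl, ih]
      by_cases he : sl = PySem.Str.lower s
      · have hnone : d.get? sl = none := by
          rw [he, PySem.Dict.get?_eq_none_iff_contains]; simpa using hc
        rw [he, PySem.Dict.get?_insert_self]
        rw [he] at hnone
        simp [hnone, List.contains_cons]
      · rw [PySem.Dict.get?_insert_of_ne d category he]
        cases h : d.get? sl with
        | some v => simp
        | none =>
          simp [List.contains_cons, he]

-- the whole index: get? sl = name of the FIRST category whose lowered list contains sl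
theorem pvBIndex_fold_get? (cats : List (String × List String))
    (d : PySem.Dict String String) (sl : String) :
    (cats.foldl (fun d p => pvBIndexCat p.1 p.2 d) d).get? sl =
      match d.get? sl with
      | some v => some v
      | none => (cats.find? (fun p => (p.2.map PySem.Str.lower).contains sl)).map Prod.fst := by
  induction cats generalizing d with
  | nil => cases h : d.get? sl <;> simp [h]
  | cons p rest ih =>
    simp only [List.foldl_cons, ih, pvBIndexCat_get?]
    cases h : d.get? sl with
    | some v => simp
    | none =>
      cases hm : (p.2.map PySem.Str.lower).contains sl with
      | true => simp only [List.find?_cons, hm, if_true, Option.map_some]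
      | false => simp only [List.find?_cons, hm, Bool.false_eq_true, if_false]

theorem pvBIndex_get? (cats : List (String × List String)) (sl : String) :
    (pvBIndex cats).get? sl =
      (cats.find? (fun p => (p.2.map PySem.Str.lower).contains sl)).map Prod.fst := by
  unfold pvBIndex
  rw [pvBIndex_fold_get?]
  simp [PySem.Dict.get?_empty]

-- A's inner break-loop is exactly the first match
theorem pvAInner_eq (sl : String) (cats : List (String × List String))
    (d : PySem.Dict String (List String)) (skill : String) :
    pvAInner sl cats d skill =
      match cats.find? (fun p => (p.2.map PySem.Str.lower).contains sl) with
      | some p => d.modify p.1 [] (· ++ [skill])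
      | none => d := by
  induction cats with
  | nil => simp [pvAInner]
  | cons p rest ih =>
    cases p with
    | mk c cs =>
      cases hm : (cs.map PySem.Str.lower).contains sl with
      | true => simp only [pvAInner, List.find?_cons, hm, if_true]
      | false =>
        simp only [pvAInner, List.find?_cons, hm, Bool.false_eq_true, if_false, ih]

-- ===== VERDICT (by name: the statement is the Claim_ definition above) =====
theorem categorize_skills_spec : Claim_equal_categorize_skills := by
  intro skills categories _ _
  unfold Spec_categorize_skills categorize_skills categorize_skills_alt
  have hstep : (fun (d : PySem.Dict String (List String)) skill =>
        pvAInner (PySem.Str.lower skill) categories d skill) =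
      (fun (d : PySem.Dict String (List String)) skill =>
        match (pvBIndex categories).get? (PySem.Str.lower skill) with
        | some category => d.modify category [] (· ++ [skill])
        | none => d) := by
    funext d skill
    rw [pvAInner_eq, pvBIndex_get?]
    cases categories.find? (fun p => (p.2.map PySem.Str.lower).contains (PySem.Str.lower skill)) with
    | none => rfl
    | some p => rfl
  rw [hstep]
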